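-- pv_equiv track=rewrite | github.com/zbennett/bbo-bot-w-extension | bridge-bot/bbo_bot.py | parse_lin_hand
-- ===== SOURCE A (Python) =====
-- SUITS = ['S', 'H', 'D', 'C']
--
-- def parse_lin_hand(lin_str):
--     """Convert LIN format (SAKQHAKQ...) to suit dictionary"""
--     hand = {s: [] for s in SUITS}
--     current_suit = None
--     for char in lin_str:
--         if char in SUITS:
--             current_suit = char
--         elif current_suit:
--             hand[current_suit].append(char)
--     return hand
-- ===== SOURCE B (Python) =====
-- SUITS = ['S', 'H', 'D', 'C']
--
-- def parse_lin_hand(lin_str):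
--     """Two-stage parse: first tokenize the string into (suit, run) segments,
--     then aggregate the segments into the suit dictionary."""
--     hand = {s: [] for s in SUITS}
--     for suit, run in _segments(list(lin_str)):
--         hand[suit].extend(run)
--     return hand
--
-- def _segments(chars):
--     segs = []
--     i, n = 0, len(chars)
--     while i < n:
--         c = chars[i]
--         if c in SUITS:
--             j = i + 1
--             while j < n and chars[j] not in SUITS:
--                 j += 1
--             segs.append((c, chars[i + 1:j]))
--             i = j
--         else:
--             i += 1
--     return segs
-- ===== Notes on version B (the rewrite author's own statement) =====
-- stated objective: alternative
-- what changed: Replaces A's single forward scan with a current-suit register and per-character dict appends by a two-stage pipeline: a tokenizer first splits the string into (suit, run) segments (characters before the first suit letter match no segment and are dropped, as in A), then a separate aggregation pass extends each suit's list with its runs.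
import Mathlib
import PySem

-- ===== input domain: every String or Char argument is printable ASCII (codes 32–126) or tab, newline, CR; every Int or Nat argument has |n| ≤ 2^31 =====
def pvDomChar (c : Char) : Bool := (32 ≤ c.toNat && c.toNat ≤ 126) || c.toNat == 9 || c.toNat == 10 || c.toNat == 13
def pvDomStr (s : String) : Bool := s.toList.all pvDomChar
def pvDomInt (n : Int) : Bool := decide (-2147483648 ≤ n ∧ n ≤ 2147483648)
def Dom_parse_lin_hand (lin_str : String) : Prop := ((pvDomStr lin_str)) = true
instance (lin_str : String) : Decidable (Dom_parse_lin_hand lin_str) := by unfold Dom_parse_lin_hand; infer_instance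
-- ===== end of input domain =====

-- B replaces A's single scan with a current-suit register by a two-stage pipeline:
-- tokenize into (suit, run) segments, then aggregate segments into the dictionary
-- (objective: alternative).

-- ===== PORT A =====
def SUITS : List String := ["S", "H", "D", "C"]

def parse_lin_hand (lin_str : String) : List (String × List String) :=
  let hand : PySem.Dict String (List String) :=
    PySem.Dict.ofList (SUITS.map (fun s => (s, ([] : List String))))
  let res := lin_str.toList.foldl
    (fun (st : PySem.Dict String (List String) × Option String) char =>
      let cs := char.toString
      if cs ∈ SUITS then (st.1, some cs)
      else
        match st.2 with
        | some cur => (st.1.modify cur [] (· ++ [cs]), st.2)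
        | none => st)
    (hand, none)
  res.1.items

-- ===== PORT B =====
-- tokenizer loop of Source B's _segments: at a suit letter, the inner 'while' collects the
-- run of non-suit characters (takeWhile) and the scan resumes after it (dropWhile);
-- other characters are skipped
def segments : List Char → List (String × List Char)
  | [] => []
  | c :: t =>
    if c.toString ∈ SUITS then
      (c.toString, t.takeWhile (fun x => !decide (x.toString ∈ SUITS))) ::
        segments (t.dropWhile (fun x => !decide (x.toString ∈ SUITS)))
    else segments t
termination_by l => l.length
decreasing_by
  all_goals first
    | exact Nat.lt_succ_of_le (t.length_dropWhile_le _)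
    | simp

def parse_lin_hand_alt (lin_str : String) : List (String × List String) :=
  let hand : PySem.Dict String (List String) :=
    PySem.Dict.ofList (SUITS.map (fun s => (s, ([] : List String))))
  let res := (segments lin_str.toList).foldl
    (fun (h : PySem.Dict String (List String)) p =>
      h.modify p.1 [] (· ++ p.2.map (fun c => c.toString)))
    hand
  res.items

-- ===== PRECONDITION & SPEC =====
def Spec_parse_lin_hand (lin_str : String) (out : List (String × List String)) : Prop := out = parse_lin_hand_alt lin_str
instance (lin_str : String) (out : List (String × List String)) : Decidable (Spec_parse_lin_hand lin_str out) := by unfold Spec_parse_lin_hand; infer_instance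

-- ===== CLAIM (what is proved, stated in full; the proofs are below) =====
def Claim_equal_parse_lin_hand : Prop := ∀ (lin_str : String), Dom_parse_lin_hand lin_str → Spec_parse_lin_hand lin_str (parse_lin_hand lin_str)

-- ===== LEMMAS AND PROOFS =====

-- cards owed to suit k by the tail t when the scan state is cur (mirrors A's step)
def delta (k : String) : List Char → Option String → List String
  | [], _ => []
  | c :: t, cur =>
    if c.toString ∈ SUITS then delta k t (some c.toString)
    else
      match cur with
      | some s => (if k = s then [c.toString] else []) ++ delta k t cur
      | none => delta k t none

-- cards before the first suit letter
def pfxCards : List Char → List String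
  | [] => []
  | c :: t => if c.toString ∈ SUITS then [] else c.toString :: pfxCards t

-- cards owed to suit k by a segment list
def collect (k : String) : List (String × List Char) → List String
  | [] => []
  | p :: ss => (if k = p.1 then p.2.map (fun c => c.toString) else []) ++ collect k ss

def mkd (a b c d : List String) : PySem.Dict String (List String) :=
  PySem.Dict.mk [("S", a), ("H", b), ("D", c), ("C", d)]

def stepA (st : PySem.Dict String (List String) × Option String) (char : Char) :
    PySem.Dict String (List String) × Option String :=
  let cs := char.toString
  if cs ∈ SUITS then (st.1, some cs)
  else
    match st.2 with
    | some cur => (st.1.modify cur [] (· ++ [cs]), st.2)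
    | none => st

def stepB (h : PySem.Dict String (List String)) (p : String × List Char) :
    PySem.Dict String (List String) :=
  h.modify p.1 [] (· ++ p.2.map (fun c => c.toString))

def lastSuit : List Char → Option String → Option String
  | [], cur => cur
  | c :: t, cur =>
    if String.singleton c ∈ SUITS then lastSuit t (some (String.singleton c)) else lastSuit t cur

lemma delta_some (k s : String) (t : List Char) :
    delta k t (some s) = (if k = s then pfxCards t else []) ++ delta k t none := by
  induction t with
  | nil => simp [delta, pfxCards]
  | cons c t ih =>
    by_cases hc : String.singleton c ∈ SUITS
    · simp [delta, pfxCards, hc]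
    · simp only [delta, pfxCards, Char.toString, hc, if_false]
      rw [ih]
      by_cases hk : k = s <;> simp [hk]

lemma foldA_char (t : List Char) :
    ∀ (a b c d : List String) (cur : Option String),
      (cur = none ∨ ∃ s, s ∈ SUITS ∧ cur = some s) →
      t.foldl stepA (mkd a b c d, cur) =
        (mkd (a ++ delta "S" t cur) (b ++ delta "H" t cur)
             (c ++ delta "D" t cur) (d ++ delta "C" t cur), lastSuit t cur) := by
  induction t with
  | nil => intro a b c d cur _; simp [delta, lastSuit]
  | cons x t ih =>
    intro a b c d cur hcur
    by_cases hx : String.singleton x ∈ SUITS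
    · have h1 : stepA (mkd a b c d, cur) x = (mkd a b c d, some (String.singleton x)) := by
        simp [stepA, Char.toString, hx]
      rw [List.foldl_cons, h1,
        ih a b c d (some (String.singleton x)) (Or.inr ⟨_, hx, rfl⟩)]
      simp [delta, lastSuit, Char.toString, hx]
    · rcases hcur with hcur | ⟨s, hs, hcur⟩
      · have h1 : stepA (mkd a b c d, cur) x = (mkd a b c d, cur) := by
          simp [stepA, Char.toString, hx, hcur]
        rw [List.foldl_cons, h1, ih a b c d cur (Or.inl hcur)]
        simp [delta, lastSuit, Char.toString, hx, hcur]
      · subst hcur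
        have hs4 : s = "S" ∨ s = "H" ∨ s = "D" ∨ s = "C" := by simpa [SUITS] using hs
        rcases hs4 with rfl | rfl | rfl | rfl
        · have h1 : stepA (mkd a b c d, some "S") x =
              (mkd (a ++ [String.singleton x]) b c d, some "S") := by
            simp [stepA, Char.toString, hx]; rfl
          rw [List.foldl_cons, h1, ih _ _ _ _ _ (Or.inr ⟨_, by decide, rfl⟩)]
          simp [delta, lastSuit, Char.toString, hx, mkd]
        · have h1 : stepA (mkd a b c d, some "H") x =
              (mkd a (b ++ [String.singleton x]) c d, some "H") := by
            simp [stepA, Char.toString, hx]; rfl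
          rw [List.foldl_cons, h1, ih _ _ _ _ _ (Or.inr ⟨_, by decide, rfl⟩)]
          simp [delta, lastSuit, Char.toString, hx, mkd]
        · have h1 : stepA (mkd a b c d, some "D") x =
              (mkd a b (c ++ [String.singleton x]) d, some "D") := by
            simp [stepA, Char.toString, hx]; rfl
          rw [List.foldl_cons, h1, ih _ _ _ _ _ (Or.inr ⟨_, by decide, rfl⟩)]
          simp [delta, lastSuit, Char.toString, hx, mkd]
        · have h1 : stepA (mkd a b c d, some "C") x =
              (mkd a b c (d ++ [String.singleton x]), some "C") := by
            simp [stepA, Char.toString, hx]; rfl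
          rw [List.foldl_cons, h1, ih _ _ _ _ _ (Or.inr ⟨_, by decide, rfl⟩)]
          simp [delta, lastSuit, Char.toString, hx, mkd]

lemma pfx_take (t : List Char) :
    pfxCards t = (t.takeWhile (fun x => !decide (x.toString ∈ SUITS))).map
      (fun c => c.toString) := by
  induction t with
  | nil => simp [pfxCards]
  | cons c t ih =>
    by_cases hc : String.singleton c ∈ SUITS
    · simp [pfxCards, List.takeWhile, Char.toString, hc]
    · simp [pfxCards, List.takeWhile, Char.toString, hc, ih]

lemma delta_none_drop (k : String) (t : List Char) :
    delta k t none = delta k (t.dropWhile (fun x => !decide (x.toString ∈ SUITS))) none := by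
  induction t with
  | nil => simp
  | cons c t ih =>
    by_cases hc : String.singleton c ∈ SUITS
    · simp [List.dropWhile, Char.toString, hc]
    · simp [delta, List.dropWhile, Char.toString, hc, ih]

lemma segments_suits (l : List Char) : ∀ p ∈ segments l, p.1 ∈ SUITS := by
  induction l using segments.induct with
  | case1 => simp [segments]
  | case2 c t hc ih =>
    intro p hp
    rw [segments, if_pos hc] at hp
    rcases List.mem_cons.mp hp with hp | hp
    · subst hp; exact hc
    · exact ih p hp
  | case3 c t hc ih =>
    intro p hp
    rw [segments, if_neg hc] at hp
    exact ih p hp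

lemma collect_segments (l : List Char) (k : String) :
    collect k (segments l) = delta k l none := by
  induction l using segments.induct with
  | case1 => simp [segments, collect, delta]
  | case2 c t hc ih =>
    rw [segments, if_pos hc]
    have hd : delta k (c :: t) none = delta k t (some c.toString) := by
      rw [delta, if_pos hc]
    rw [hd, delta_some, collect, ih, pfx_take, ← delta_none_drop]
  | case3 c t hc ih =>
    rw [segments, if_neg hc]
    have hd : delta k (c :: t) none = delta k t none := by
      rw [delta, if_neg hc]
    rw [hd, ih]

lemma foldB_segs (ss : List (String × List Char)) :
    ∀ (a b c d : List String), (∀ p ∈ ss, p.1 ∈ SUITS) →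
      ss.foldl stepB (mkd a b c d) =
        mkd (a ++ collect "S" ss) (b ++ collect "H" ss)
            (c ++ collect "D" ss) (d ++ collect "C" ss) := by
  induction ss with
  | nil => intro a b c d _; simp [collect]
  | cons p ss ih =>
    intro a b c d hss
    have hp : p.1 ∈ SUITS := hss p (by simp)
    have hss' : ∀ q ∈ ss, q.1 ∈ SUITS := fun q hq => hss q (by simp [hq])
    have hp4 : p.1 = "S" ∨ p.1 = "H" ∨ p.1 = "D" ∨ p.1 = "C" := by simpa [SUITS] using hp
    rcases hp4 with hs | hs | hs | hs
    · have h1 : stepB (mkd a b c d) p =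
          mkd (a ++ p.2.map (fun c => c.toString)) b c d := by
        simp [stepB, hs]; rfl
      rw [List.foldl_cons, h1, ih _ _ _ _ hss']
      simp [collect, hs, mkd]
    · have h1 : stepB (mkd a b c d) p =
          mkd a (b ++ p.2.map (fun c => c.toString)) c d := by
        simp [stepB, hs]; rfl
      rw [List.foldl_cons, h1, ih _ _ _ _ hss']
      simp [collect, hs, mkd]
    · have h1 : stepB (mkd a b c d) p =
          mkd a b (c ++ p.2.map (fun c => c.toString)) d := by
        simp [stepB, hs]; rfl
      rw [List.foldl_cons, h1, ih _ _ _ _ hss']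
      simp [collect, hs, mkd]
    · have h1 : stepB (mkd a b c d) p =
          mkd a b c (d ++ p.2.map (fun c => c.toString)) := by
        simp [stepB, hs]; rfl
      rw [List.foldl_cons, h1, ih _ _ _ _ hss']
      simp [collect, hs, mkd]

-- ===== VERDICT (by name: the statement is the Claim_ definition above) =====
theorem parse_lin_hand_spec : Claim_equal_parse_lin_hand := by
  intro lin_str _
  unfold Spec_parse_lin_hand
  show (lin_str.toList.foldl stepA (mkd [] [] [] [], none)).1.items =
    ((segments lin_str.toList).foldl stepB (mkd [] [] [] [])).items
  rw [foldA_char _ [] [] [] [] none (Or.inl rfl),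
    foldB_segs _ [] [] [] [] (segments_suits _)]
  simp [collect_segments]
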